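-- pv_equiv track=rewrite | github.com/jameskermode/mograder | src/mograder/grading/cells.py | _inject_type_metadata
-- ===== SOURCE A (Python) =====
-- def _inject_type_metadata(lines: list[str], notebook_type: str) -> list[str]:
--     """Insert ``mograder-type`` into a PEP 723 script block.
--
--     If no PEP 723 block exists, one is created after the first line
--     (``import marimo``).
--     """
--     close_idx = None
--     in_block = False
--     for i, line in enumerate(lines):
--         stripped = line.strip()
--         if stripped == "# /// script":
--             in_block = True
--         elif in_block and stripped == "# ///":
--             close_idx = i
--             break
--
--     new_line = f'# mograder-type = "{notebook_type}"\n'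
--
--     if close_idx is not None:
--         return lines[:close_idx] + [new_line] + lines[close_idx:]
--
--     # No PEP 723 block — create a minimal one after ``import marimo``
--     insert_after = 0
--     for i, line in enumerate(lines):
--         if line.strip().startswith("import marimo"):
--             insert_after = i + 1
--             break
--
--     block = [
--         "\n",
--         "# /// script\n",
--         new_line,
--         "# ///\n",
--         "\n",
--     ]
--     return lines[:insert_after] + block + lines[insert_after:]
-- ===== SOURCE B (Python) =====
-- def _inject_type_metadata(lines: list[str], notebook_type: str) -> list[str]:
--     """Single pass: track block state, first close index, and first 'import marimo' index."""
--     new_line = f'# mograder-type = "{notebook_type}"\n'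
--     in_block = False
--     close_idx = None
--     marimo_idx = None
--     for i, line in enumerate(lines):
--         stripped = line.strip()
--         if stripped == "# /// script":
--             in_block = True
--         elif in_block and stripped == "# ///":
--             close_idx = i
--             break
--         if marimo_idx is None and stripped.startswith("import marimo"):
--             marimo_idx = i
--     if close_idx is not None:
--         return lines[:close_idx] + [new_line] + lines[close_idx:]
--     insert_after = 0 if marimo_idx is None else marimo_idx + 1
--     block = ["\n", "# /// script\n", new_line, "# ///\n", "\n"]
--     return lines[:insert_after] + block + lines[insert_after:]
-- ===== Notes on version B (the rewrite author's own statement) =====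
-- stated objective: simpler
-- what changed: A's two sequential scans (one for the block close, a second from the start for 'import marimo') are merged into one pass that simultaneously tracks the block state, the close index and the first import-marimo index.
import Mathlib
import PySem

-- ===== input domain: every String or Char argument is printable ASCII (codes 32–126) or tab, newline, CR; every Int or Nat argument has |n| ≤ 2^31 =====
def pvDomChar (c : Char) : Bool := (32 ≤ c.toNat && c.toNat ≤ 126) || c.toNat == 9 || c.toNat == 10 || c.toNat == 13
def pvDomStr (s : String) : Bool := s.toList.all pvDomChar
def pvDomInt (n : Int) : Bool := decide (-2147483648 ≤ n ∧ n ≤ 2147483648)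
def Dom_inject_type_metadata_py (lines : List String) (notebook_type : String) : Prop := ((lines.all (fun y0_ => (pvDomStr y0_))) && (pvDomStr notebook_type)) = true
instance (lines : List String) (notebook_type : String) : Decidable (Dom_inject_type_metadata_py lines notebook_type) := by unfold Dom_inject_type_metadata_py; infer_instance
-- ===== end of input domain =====

-- B merges A's two sequential scans into one pass that tracks the block state, the
-- first block-close index and the first 'import marimo' index together (objective: simpler).

-- ===== PORT A =====
-- first loop of A: scan with in_block state, return index of the first '# ///' seen inside a block
def pvACloseScan : List String → Nat → Bool → Option Nat
  | [], _, _ => none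
  | l :: rest, i, inb =>
    let s := PySem.Str.strip l
    if s == "# /// script" then pvACloseScan rest (i + 1) true
    else if inb && s == "# ///" then some i
    else pvACloseScan rest (i + 1) inb

-- second loop of A: first line whose strip starts with "import marimo" gives i+1, default 0
def pvAMarimoScan : List String → Nat → Nat
  | [], _ => 0
  | l :: rest, i =>
    if PySem.Str.startswith (PySem.Str.strip l) "import marimo" then i + 1
    else pvAMarimoScan rest (i + 1)

-- slices lines[:i] / lines[i:] are List.take / List.drop (indices here are Nats in range: exact)
def inject_type_metadata_py (lines : List String) (notebook_type : String) : List String :=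
  let new_line := "# mograder-type = \"" ++ notebook_type ++ "\"\n"
  match pvACloseScan lines 0 false with
  | some c => lines.take c ++ [new_line] ++ lines.drop c
  | none =>
    let insert_after := pvAMarimoScan lines 0
    lines.take insert_after ++ ["\n", "# /// script\n", new_line, "# ///\n", "\n"] ++ lines.drop insert_after

-- ===== PORT B =====
-- single pass: returns (close index if any, first import-marimo index if any)
def pvBScan : List String → Nat → Bool → Option Nat → Option Nat × Option Nat
  | [], _, _, mar => (none, mar)
  | l :: rest, i, inb, mar =>
    let s := PySem.Str.strip l
    if s == "# /// script" then
      let mar' := if mar == none && PySem.Str.startswith s "import marimo" then some i else mar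
      pvBScan rest (i + 1) true mar'
    else if inb && s == "# ///" then (some i, mar)
    else
      let mar' := if mar == none && PySem.Str.startswith s "import marimo" then some i else mar
      pvBScan rest (i + 1) inb mar'

def inject_type_metadata_py_alt (lines : List String) (notebook_type : String) : List String :=
  let new_line := "# mograder-type = \"" ++ notebook_type ++ "\"\n"
  match pvBScan lines 0 false none with
  | (some c, _) => lines.take c ++ [new_line] ++ lines.drop c
  | (none, mar) =>
    let insert_after := match mar with | none => 0 | some j => j + 1
    lines.take insert_after ++ ["\n", "# /// script\n", new_line, "# ///\n", "\n"] ++ lines.drop insert_after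

-- ===== PRECONDITION & SPEC =====
def Spec_inject_type_metadata_py (lines : List String) (notebook_type : String) (out : List String) : Prop := out = inject_type_metadata_py_alt lines notebook_type
instance (lines : List String) (notebook_type : String) (out : List String) : Decidable (Spec_inject_type_metadata_py lines notebook_type out) := by unfold Spec_inject_type_metadata_py; infer_instance

-- ===== CLAIM (what is proved, stated in full; the proofs are below) =====
def Claim_equal_inject_type_metadata_py : Prop := ∀ (lines : List String) (notebook_type : String), Dom_inject_type_metadata_py lines notebook_type → Spec_inject_type_metadata_py lines notebook_type (inject_type_metadata_py lines notebook_type)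

-- ===== LEMMAS AND PROOFS =====

-- the single pass finds the same close index as A's first loop
theorem pvBScan_fst (lines : List String) (i : Nat) (inb : Bool) (mar : Option Nat) :
    (pvBScan lines i inb mar).1 = pvACloseScan lines i inb := by
  induction lines generalizing i inb mar with
  | nil => rfl
  | cons l rest ih =>
    simp only [pvBScan, pvACloseScan]
    split_ifs <;> first | rfl | simp [ih]

-- once recorded, the marimo index is never changed
theorem pvBScan_some (lines : List String) (i : Nat) (inb : Bool) (j : Nat) :
    (pvBScan lines i inb (some j)).2 = some j := by
  induction lines generalizing i inb with
  | nil => rfl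
  | cons l rest ih =>
    simp only [pvBScan]
    split_ifs <;> first | rfl | simp [ih] | simp_all

-- when no close is found, the recorded marimo index yields exactly A's second-loop result
theorem pvBScan_snd (lines : List String) (i : Nat) (inb : Bool)
    (h : pvACloseScan lines i inb = none) :
    (match (pvBScan lines i inb none).2 with | none => 0 | some j => j + 1)
      = pvAMarimoScan lines i := by
  induction lines generalizing i inb with
  | nil => rfl
  | cons l rest ih =>
    simp only [pvBScan, pvACloseScan, pvAMarimoScan] at *
    cases hm : PySem.Str.startswith (PySem.Str.strip l) "import marimo" with
    | true =>
      simp only [hm, Bool.and_true] at *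
      split_ifs at h ⊢ <;> first | exact ih _ _ h | simp_all [pvBScan_some]
    | false =>
      simp only [hm, Bool.and_false] at *
      split_ifs at h ⊢ <;> first | exact ih _ _ h | simp_all

-- ===== VERDICT (by name: the statement is the Claim_ definition above) =====
theorem inject_type_metadata_py_spec : Claim_equal_inject_type_metadata_py := by
  intro lines notebook_type _
  unfold Spec_inject_type_metadata_py inject_type_metadata_py inject_type_metadata_py_alt
  have hfst := pvBScan_fst lines 0 false none
  rcases hB : pvBScan lines 0 false none with ⟨c?, mar⟩
  rcases c? with _ | c
  · have hA : pvACloseScan lines 0 false = none := by rw [← hfst, hB]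
    have := pvBScan_snd lines 0 false hA
    rw [hB] at this
    simp only [hA]
    simp only at this
    rw [this]
  · have hA : pvACloseScan lines 0 false = some c := by rw [← hfst, hB]
    simp [hA]
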